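-- pv_equiv track=rewrite | github.com/Naodab/Smart_Home | Backend/api/command_processor.py | _extract_ngrams
-- ===== SOURCE A (Python) =====
-- from typing import Dict, List, Tuple, Set
--
-- def _extract_ngrams(text: str, max_len: int = 4) -> List[str]:
--     words = text.split()
--     ngrams = []
--
--     for n in range(1, min(max_len + 1, len(words) + 1)):
--         for i in range(len(words) - n + 1):
--             ngram = ' '.join(words[i:i + n])
--             ngrams.append(ngram)
--
--     ngrams.sort(key=len, reverse=True)
--     return ngrams
-- ===== SOURCE B (Python) =====
-- def _extract_ngrams(text, max_len=4):
--     words = text.split()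
--     buckets = {}
--     level = list(words)  # current n-grams, built incrementally from the previous level
--     n = 1
--     while level and n <= max_len:
--         for g in level:
--             buckets.setdefault(len(g), []).append(g)
--         level = [level[i] + ' ' + words[i + n] for i in range(len(level) - 1)]
--         n += 1
--     out = []
--     for k in sorted(buckets, reverse=True):
--         out += buckets[k]
--     return out
-- ===== Notes on version B (the rewrite author's own statement) =====
-- stated objective: alternative
-- what changed: B builds each (n+1)-gram incrementally from the previous level's n-gram plus the next word (dynamic programming instead of re-slicing and re-joining for every n,i), and replaces A's final stable comparison sort with a length-keyed bucket (counting) sort emitted in descending key order, insertion order inside each bucket reproducing A's stable ties.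
import Mathlib
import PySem

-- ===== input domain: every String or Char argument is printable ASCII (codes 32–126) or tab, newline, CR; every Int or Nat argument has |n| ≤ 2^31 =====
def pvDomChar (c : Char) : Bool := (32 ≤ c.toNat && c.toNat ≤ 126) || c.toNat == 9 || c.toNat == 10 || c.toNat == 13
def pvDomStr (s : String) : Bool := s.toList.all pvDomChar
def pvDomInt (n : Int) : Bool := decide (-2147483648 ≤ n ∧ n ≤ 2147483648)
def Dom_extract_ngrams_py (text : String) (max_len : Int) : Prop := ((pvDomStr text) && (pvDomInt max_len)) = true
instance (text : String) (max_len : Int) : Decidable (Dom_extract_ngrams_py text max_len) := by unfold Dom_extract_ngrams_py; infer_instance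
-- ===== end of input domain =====

-- B builds each (n+1)-gram incrementally from the previous level's n-gram plus the next word
-- (instead of re-slicing and re-joining for every n,i) and replaces A's stable comparison sort
-- with a length-keyed bucket (counting) sort emitted in descending key order.

-- ===== PORT A =====
def extract_ngrams_py (text : String) (max_len : Int) : List String :=
  let words := PySem.Str.split₀ text
  let ngrams : List String := []
  let ngrams := (PySem.List.pyRange 1 (min (max_len + 1) ((words.length : Int) + 1)) 1).foldl
    (fun ngrams n =>
      (PySem.List.pyRange 0 ((words.length : Int) - n + 1) 1).foldl
        (fun ngrams i =>
          ngrams ++ [PySem.Str.join " " (PySem.List.slice words (some i) (some (i + n)))])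
        ngrams)
    ngrams
  PySem.List.sorted ngrams (fun g => PySem.Str.len g) true

-- ===== PORT B =====
-- the while loop of Source B: while level and n <= max_len, bucket the current level's n-grams,
-- then build the next level from it; terminates because the level shrinks by one element.
-- (Python's level[i] / words[i+n] always hit in-range indices here, so pyGetD's default is dead.)
def pvNgramLoop (words : List String) (max_len : Int)
    (buckets : PySem.Dict Int (List String)) (level : List String) (n : Int) :
    PySem.Dict Int (List String) :=
  if h : level ≠ [] ∧ n ≤ max_len then
    let buckets' := level.foldl
      (fun d s => d.modify (PySem.Str.len s) [] (fun lst => lst ++ [s])) buckets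
    let level' := (PySem.List.pyRange 0 ((level.length : Int) - 1) 1).map
      (fun i => PySem.List.pyGetD level i "" ++ " " ++ PySem.List.pyGetD words (i + n) "")
    pvNgramLoop words max_len buckets' level' (n + 1)
  else buckets
termination_by level.length
decreasing_by
  have := List.length_pos_of_ne_nil h.1
  simp [PySem.List.length_pyRange_one]
  omega

def extract_ngrams_py_alt (text : String) (max_len : Int) : List String :=
  let words := PySem.Str.split₀ text
  let buckets := pvNgramLoop words max_len PySem.Dict.empty words 1
  (PySem.List.sorted buckets.keys (fun k => k) true).foldl
    (fun out k => out ++ buckets.getD k []) []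

-- ===== PRECONDITION & SPEC =====
def Spec_extract_ngrams_py (text : String) (max_len : Int) (out : List String) : Prop := out = extract_ngrams_py_alt text max_len
instance (text : String) (max_len : Int) (out : List String) : Decidable (Spec_extract_ngrams_py text max_len out) := by unfold Spec_extract_ngrams_py; infer_instance

-- ===== CLAIM (what is proved, stated in full; the proofs are below) =====
def Claim_equal_extract_ngrams_py : Prop := ∀ (text : String) (max_len : Int), Dom_extract_ngrams_py text max_len → Spec_extract_ngrams_py text max_len (extract_ngrams_py text max_len)

-- ===== LEMMAS AND PROOFS =====

-- proof-only abbreviations: the (n,i) n-gram, the bucketing step, the list of all n-grams for a fixed n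
def pvG (words : List String) (n i : Int) : String :=
  PySem.Str.join " " (PySem.List.slice words (some i) (some (i + n)))

def pvStep (d : PySem.Dict Int (List String)) (s : String) : PySem.Dict Int (List String) :=
  d.modify (PySem.Str.len s) [] (fun lst => lst ++ [s])

def pvLvl (words : List String) (n : Int) : List String :=
  (PySem.List.pyRange 0 ((words.length : Int) - n + 1) 1).map (pvG words n)

theorem pv_str_ext {a b : String} (h : a.toList = b.toList) : a = b := by
  have := congrArg String.ofList h; simpa using this

theorem pv_chars_join_snoc (sep y : List Char) (p : List Char) (xs : List (List Char)) :
    PySem.Chars.join sep ((p :: xs) ++ [y]) = PySem.Chars.join sep (p :: xs) ++ sep ++ y := by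
  induction xs generalizing p with
  | nil => simp [PySem.Chars.join_cons_cons, PySem.Chars.join_singleton]
  | cons q t ih =>
      have h1 := ih q
      simp only [List.cons_append] at h1 ⊢
      rw [PySem.Chars.join_cons_cons, h1, PySem.Chars.join_cons_cons]
      simp [List.append_assoc]

theorem pv_join_snoc (y : String) (xs : List String) (h : xs ≠ []) :
    PySem.Str.join " " xs ++ " " ++ y = PySem.Str.join " " (xs ++ [y]) := by
  apply pv_str_ext
  obtain ⟨p, t, rfl⟩ := List.exists_cons_of_ne_nil h
  simp only [String.toList_append, PySem.Str.toList_join, List.map_append, List.map_cons,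
    List.map_nil]
  exact (pv_chars_join_snoc " ".toList y.toList p.toList (t.map String.toList)).symm

theorem pv_singleton_gram (words : List String) (i : Int) (h0 : 0 ≤ i)
    (h1 : i < (words.length : Int)) : pvG words 1 i = PySem.List.pyGetD words i "" := by
  unfold pvG
  have hlt : i.toNat < words.length := by omega
  rw [PySem.List.slice_toNat words h0 (show (0:Int) ≤ i + 1 by omega)]
  have h2 : (i + 1).toNat - i.toNat = 1 := by omega
  have hget : PySem.List.pyGetD words i "" = words[i.toNat] := by
    rw [PySem.List.pyGetD_eq_getElem] <;> omega
  rw [h2, List.drop_eq_getElem_cons hlt, hget]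
  rw [show List.take 1 (words[i.toNat] :: List.drop (i.toNat + 1) words)
        = [words[i.toNat]] from rfl]
  apply pv_str_ext
  rw [PySem.Str.toList_join, List.map_cons, List.map_nil, PySem.Chars.join_singleton]

-- extending an n-gram by the next word gives the (n+1)-gram at the same start
theorem pv_slide (words : List String) (n i : Int) (hn : 1 ≤ n) (h0 : 0 ≤ i)
    (h1 : i + n < (words.length : Int)) :
    pvG words n i ++ " " ++ PySem.List.pyGetD words (i + n) "" = pvG words (n + 1) i := by
  unfold pvG
  have ha : (i + n).toNat < words.length := by omega
  have hsplit : PySem.List.slice words (some i) (some (i + n + 1))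
      = PySem.List.slice words (some i) (some (i + n)) ++ [words[(i + n).toNat]] := by
    rw [PySem.List.slice_toNat words h0 (show (0:Int) ≤ i + n by omega),
        PySem.List.slice_toNat words h0 (show (0:Int) ≤ i + n + 1 by omega)]
    have h2 : (i + n + 1).toNat - i.toNat = ((i + n).toNat - i.toNat) + 1 := by omega
    rw [h2, List.take_add_one, List.getElem?_drop]
    have h3 : i.toNat + ((i + n).toNat - i.toNat) = (i + n).toNat := by omega
    rw [h3, List.getElem?_eq_getElem ha]
    rfl
  have hne : PySem.List.slice words (some i) (some (i + n)) ≠ [] := by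
    rw [PySem.List.slice_toNat words h0 (show (0:Int) ≤ i + n by omega)]
    have hl : (((words.drop i.toNat)).take ((i + n).toNat - i.toNat)).length
        = (i + n).toNat - i.toNat := by
      rw [List.length_take, List.length_drop]; omega
    intro hnil
    rw [hnil] at hl
    simp at hl
    omega
  have h4 : i + (n + 1) = i + n + 1 := by ring
  have hget : PySem.List.pyGetD words (i + n) "" = words[(i + n).toNat] := by
    rw [PySem.List.pyGetD_eq_getElem] <;> omega
  rw [h4, hsplit, ← pv_join_snoc _ _ hne, hget]

-- the current level (the n-grams) determines the next level (the (n+1)-grams)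
theorem pv_next_level (words : List String) (n : Int) (hn : 1 ≤ n)
    (hL : n ≤ (words.length : Int)) :
    (PySem.List.pyRange 0 (((pvLvl words n).length : Int) - 1) 1).map
      (fun i => PySem.List.pyGetD (pvLvl words n) i "" ++ " "
        ++ PySem.List.pyGetD words (i + n) "")
    = pvLvl words (n + 1) := by
  have hlen : ((pvLvl words n).length : Int) = (words.length : Int) - n + 1 := by
    unfold pvLvl
    rw [List.length_map, PySem.List.length_pyRange_one]
    omega
  rw [hlen]
  conv_rhs => unfold pvLvl
  have hb : (words.length : Int) - n + 1 - 1 = (words.length : Int) - (n + 1) + 1 := by ring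
  rw [hb]
  apply List.map_congr_left
  intro i hi
  rw [PySem.List.mem_pyRange_one] at hi
  have hi2 : i < (words.length : Int) - n + 1 := by omega
  conv_lhs => rw [pvLvl.eq_def]
  rw [PySem.List.pyGetD_map_pyRange_of_nonneg (pvG words n)
        ((words.length : Int) - n + 1) i "" hi.1 hi2]
  exact pv_slide words n i hn hi.1 (by omega)

theorem pv_lvl_one (words : List String) : pvLvl words 1 = words := by
  unfold pvLvl
  have hb : (words.length : Int) - 1 + 1 = (words.length : Int) := by ring
  rw [hb]
  exact (List.map_congr_left (fun i hi => by
      rw [PySem.List.mem_pyRange_one] at hi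
      exact pv_singleton_gram words i hi.1 hi.2)).trans
    (PySem.List.map_pyGetD_pyRange_zero' words "")

-- the while loop bucketing each level equals one fold of pvStep over all remaining n-grams
theorem pv_loop_eq (words : List String) (max_len : Int) :
    ∀ (k : Nat) (n : Int) (d : PySem.Dict Int (List String)), 1 ≤ n →
      k = (min max_len ((words.length : Int)) + 1 - n).toNat →
      pvNgramLoop words max_len d (pvLvl words n) n
      = ((PySem.List.pyRange n (min max_len ((words.length : Int)) + 1) 1).flatMap
          (fun m => pvLvl words m)).foldl pvStep d := by
  intro k
  induction k with
  | zero =>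
      intro n d hn hk
      have hm1 : min max_len ((words.length : Int)) ≤ max_len := min_le_left _ _
      have hm3 := min_choice max_len ((words.length : Int))
      have hstop : min max_len ((words.length : Int)) + 1 ≤ n := by
        rcases hm3 with h | h <;> omega
      rw [pvNgramLoop, PySem.List.pyRange_one_eq_nil hstop]
      have hcond : ¬ (pvLvl words n ≠ [] ∧ n ≤ max_len) := by
        by_cases hml : n ≤ max_len
        · have hL : (words.length : Int) < n := by rcases hm3 with h | h <;> omega
          have hnil : pvLvl words n = [] := by
            unfold pvLvl
            rw [PySem.List.pyRange_one_eq_nil (by omega)]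
            rfl
          simp [hnil]
        · simp [hml]
      simp [hcond]
  | succ k ih =>
      intro n d hn hk
      have hm1 : min max_len ((words.length : Int)) ≤ max_len := min_le_left _ _
      have hm2 : min max_len ((words.length : Int)) ≤ (words.length : Int) := min_le_right _ _
      have hml : n ≤ max_len := by omega
      have hL : n ≤ (words.length : Int) := by omega
      have hne : pvLvl words n ≠ [] := by
        unfold pvLvl
        intro hnil
        have hlen := congrArg List.length hnil
        rw [List.length_map, PySem.List.length_pyRange_one] at hlen
        simp at hlen
        omega
      rw [pvNgramLoop]
      simp only [hne, hml, ne_eq, not_false_eq_true, and_self, dite_true]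
      have hbucket : (pvLvl words n).foldl
          (fun d s => d.modify (PySem.Str.len s) [] (fun lst => lst ++ [s])) d
          = (pvLvl words n).foldl pvStep d := rfl
      rw [hbucket, pv_next_level words n hn hL,
          ih (n + 1) ((pvLvl words n).foldl pvStep d) (by omega) (by omega),
          PySem.List.pyRange_one_cons
            (show n < min max_len ((words.length : Int)) + 1 by omega),
          List.flatMap_cons, List.foldl_append]

-- skipping a prefix no element of which goes after x
theorem pv_insertBy_append_not {α : Type} (before : α → α → Bool) (x : α) (l₁ l₂ : List α)
    (h : ∀ y ∈ l₁, before x y = false) :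
    PySem.List.insertBy before x (l₁ ++ l₂) = l₁ ++ PySem.List.insertBy before x l₂ := by
  induction l₁ with
  | nil => simp
  | cons a t ih =>
      simp only [List.cons_append, PySem.List.insertBy, h a (by simp)]
      simp only [Bool.false_eq_true, if_false, List.cons.injEq, true_and]
      exact ih (fun y hy => h y (by simp [hy]))

theorem pv_insertBy_all_before {α : Type} (before : α → α → Bool) (x : α) (t : List α)
    (h : ∀ y ∈ t, before x y = true) :
    PySem.List.insertBy before x t = x :: t := by
  cases t with
  | nil => rfl
  | cons a s => simp [PySem.List.insertBy, h a (by simp)]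

theorem pv_insertBy_flatMap {α : Type} (key : α → Int) (x : α) (ks : List Int) (f : Int → List α)
    (hks : ks.Pairwise (· > ·)) (hf : ∀ c ∈ ks, ∀ a ∈ f c, key a = c) (hk : key x ∈ ks) :
    PySem.List.insertBy (fun a b => decide (key b < key a)) x (ks.flatMap f)
      = ks.flatMap (fun c => f c ++ if key x == c then [x] else []) := by
  induction ks with
  | nil => cases hk
  | cons c ks' ih =>
      have hgt : ∀ c' ∈ ks', c > c' := (List.pairwise_cons.mp hks).1
      have hfc : ∀ a ∈ f c, key a = c := hf c (by simp)
      by_cases hx : key x = c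
      · -- x belongs to the head bucket: skip f c, then insert before everything
        have hskip : ∀ y ∈ f c, (fun a b => decide (key b < key a)) x y = false := by
          intro y hy; simp [hfc y hy, hx]
        have hall : ∀ y ∈ ks'.flatMap f, (fun a b => decide (key b < key a)) x y = true := by
          intro y hy
          rcases List.mem_flatMap.mp hy with ⟨c', hc', hyc'⟩
          have := hf c' (by simp [hc']) y hyc'
          simp [this, hx]
          exact hgt c' hc'
        have hnot : key x ∉ ks' := by
          intro hmem; exact absurd (hgt _ hmem) (by simp [hx])
        rw [List.flatMap_cons, pv_insertBy_append_not _ _ _ _ hskip,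
            pv_insertBy_all_before _ _ _ hall]
        rw [List.flatMap_cons]
        have hrest : ks'.flatMap (fun c => f c ++ if key x == c then [x] else [])
            = ks'.flatMap f := by
          apply List.flatMap_congr
          intro c' hc'
          have : (key x == c') = false := by
            simp only [beq_eq_false_iff_ne, ne_eq]
            intro h; exact hnot (h ▸ hc')
          simp [this]
        rw [hrest]
        simp [hx]
      · -- x belongs to a later bucket: skip f c, recurse
        have hk' : key x ∈ ks' := by
          rcases hk with _ | h
          · exact absurd rfl hx
          · assumption
        have hlt : key x < c := hgt _ hk'
        have hskip : ∀ y ∈ f c, (fun a b => decide (key b < key a)) x y = false := by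
          intro y hy
          simp only [decide_eq_false_iff_not, not_lt, hfc y hy]
          exact le_of_lt hlt
        rw [List.flatMap_cons, pv_insertBy_append_not _ _ _ _ hskip,
            ih (List.pairwise_cons.mp hks).2 (fun c' hc' => hf c' (by simp [hc'])) hk',
            List.flatMap_cons]
        have : (key x == c) = false := by simp [hx]
        simp [this]

-- the stable descending sort is the concatenation of the length buckets in descending key order
theorem pv_sorted_rev_eq_flatMap {α : Type} (key : α → Int) (ks : List Int)
    (hks : ks.Pairwise (· > ·)) :
    ∀ (xs : List α), (∀ a ∈ xs, key a ∈ ks) →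
      PySem.List.sorted xs key true = ks.flatMap (fun c => xs.filter (fun a => key a == c)) := by
  intro xs
  induction xs using List.reverseRecOn with
  | nil => intro _; simp [PySem.List.sorted]
  | append_singleton xs x ih =>
      intro hmem
      have hmem' : ∀ a ∈ xs, key a ∈ ks := fun a ha => hmem a (by simp [ha])
      rw [PySem.List.sorted_rev_eq_foldl_insertBy, List.foldl_append, List.foldl_cons,
          List.foldl_nil, ← PySem.List.sorted_rev_eq_foldl_insertBy, ih hmem',
          pv_insertBy_flatMap key x ks _ hks
            (fun c _ a ha => by simpa using (List.mem_filter.mp ha).2)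
            (hmem x (by simp))]
      apply List.flatMap_congr
      intro c _
      by_cases h : key x = c
      · have hb : (key x == c) = true := by simp [h]
        simp [List.filter_append, List.filter, hb]
      · have hb : (key x == c) = false := by simp [h]
        simp [List.filter_append, List.filter, hb]

-- ===== VERDICT (by name: the statement is the Claim_ definition above) =====
theorem extract_ngrams_py_spec : Claim_equal_extract_ngrams_py := by
  intro text max_len _
  unfold Spec_extract_ngrams_py extract_ngrams_py extract_ngrams_py_alt
  simp only []
  set words := PySem.Str.split₀ text with hwords
  have hpv : ∀ (n i : Int),
      PySem.Str.join " " (PySem.List.slice words (some i) (some (i + n))) = pvG words n i :=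
    fun _ _ => rfl
  simp only [hpv]
  have hbound : min (max_len + 1) ((words.length : Int) + 1)
      = min max_len ((words.length : Int)) + 1 :=
    min_add_add_right max_len ((words.length : Int)) 1
  rw [hbound]
  set gen : List String :=
    (PySem.List.pyRange 1 (min max_len ((words.length : Int)) + 1) 1).flatMap
      (fun m => pvLvl words m) with hgen
  -- A's nested appending loop builds gen, so A = sorted gen len true
  have hA : (PySem.List.pyRange 1 (min max_len ((words.length : Int)) + 1) 1).foldl
      (fun ngrams n =>
        (PySem.List.pyRange 0 ((words.length : Int) - n + 1) 1).foldl
          (fun ngrams i => ngrams ++ [pvG words n i]) ngrams) [] = gen := by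
    rw [PySem.List.foldl_congr_mem _ _
          (fun acc n => acc ++ (PySem.List.pyRange 0 ((words.length : Int) - n + 1) 1).map
            (pvG words n)) []
          (fun acc n _ => PySem.List.foldl_append_singleton_eq_map (pvG words n) _ acc),
        PySem.List.foldl_append_eq_flatMap]
    simp [hgen, pvLvl]
  rw [hA]
  -- B's while loop is a single bucket-building fold over gen
  have hB : pvNgramLoop words max_len PySem.Dict.empty words 1
      = List.foldl pvStep PySem.Dict.empty gen := by
    have h0 := pv_loop_eq words max_len
      (min max_len ((words.length : Int)) + 1 - 1).toNat 1 PySem.Dict.empty le_rfl rfl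
    rw [pv_lvl_one words] at h0
    rw [h0, hgen]
  rw [hB]
  set buckets : PySem.Dict Int (List String) := List.foldl pvStep PySem.Dict.empty gen
    with hbuckets
  -- keys of the buckets: the distinct lengths, in first-occurrence order
  have hkeys : buckets.keys = PySem.Set.ofList (gen.map PySem.Str.len) := by
    rw [hbuckets]
    show (List.foldl (fun d s => d.modify (PySem.Str.len s) [] (fun lst => lst ++ [s]))
        PySem.Dict.empty gen).keys = _
    rw [PySem.Dict.keys_foldl_modify_key gen PySem.Str.len [] (fun _ s lst => lst ++ [s])
          PySem.Dict.empty]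
    rfl
  -- each bucket is the corresponding filter of gen
  have hgetD : ∀ c : Int, buckets.getD c [] = gen.filter (fun s => PySem.Str.len s == c) := by
    intro c
    have hfold : List.foldl pvStep PySem.Dict.empty gen
        = (gen.map (fun s => (PySem.Str.len s, s))).foldl
            (fun d p => d.modify p.1 [] (fun lst => lst ++ [p.2])) PySem.Dict.empty := by
      rw [List.foldl_map]; rfl
    rw [hbuckets, hfold, PySem.Dict.getD_foldl_modify_append, List.filter_map]
    simp [Function.comp_def]
  -- the output loop concatenates the buckets in descending key order
  rw [PySem.List.foldl_congr_mem _ _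
        (fun out k => out ++ gen.filter (fun s => PySem.Str.len s == k)) []
        (fun acc k _ => by rw [hgetD k]),
      PySem.List.foldl_append_eq_flatMap, List.nil_append, hkeys]
  -- the sorted distinct keys are strictly descending …
  have hnd : (PySem.List.sorted (PySem.Set.ofList (gen.map PySem.Str.len)) (fun k => k)
      true).Pairwise (· > ·) := by
    have h1 := PySem.List.sorted_pairwise_rev (PySem.Set.ofList (gen.map PySem.Str.len))
      (fun k : Int => k)
    have h2 : (PySem.List.sorted (PySem.Set.ofList (gen.map PySem.Str.len)) (fun k : Int => k)
        true).Nodup :=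
      (PySem.List.sorted_perm _ _ _).nodup_iff.mpr (PySem.Set.nodup_ofList _)
    exact (h1.and (List.nodup_iff_pairwise_ne.mp h2)).imp
      (fun h => lt_of_le_of_ne h.1 (Ne.symm h.2))
  -- … and cover every length occurring in gen
  exact pv_sorted_rev_eq_flatMap PySem.Str.len _ hnd gen
    (fun a ha => (PySem.List.mem_sorted _ _ _ _).mpr
      ((PySem.Set.mem_ofList _ _).mpr (List.mem_map_of_mem ha)))
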